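-- pv_equiv track=rewrite | github.com/OmRamani98/Summary-Master-Selected-Text-Summary-Extension | app.py | calculate_sentence_scores
-- ===== SOURCE A (Python) =====
-- def calculate_sentence_scores(sentences, word_frequencies):
--     sentence_scores = {}
--
--     for i, sentence in enumerate(sentences):
--         for word, freq in word_frequencies.items():
--             if word in sentence.lower():
--                 if i not in sentence_scores:
--                     sentence_scores[i] = freq
--                 else:
--                     sentence_scores[i] += freq
--
--     return sentence_scores
-- ===== SOURCE B (Python) =====
-- def calculate_sentence_scores(sentences, word_frequencies):
--     lowered = [s.lower() for s in sentences]
--     scores = [0] * len(lowered)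
--     matched = [False] * len(lowered)
--     for word, freq in word_frequencies.items():
--         hits = [word in s for s in lowered]
--         scores = [sc + freq if h else sc for sc, h in zip(scores, hits)]
--         matched = [m or h for m, h in zip(matched, hits)]
--     return {i: sc for i, (sc, m) in enumerate(zip(scores, matched)) if m}
-- ===== Notes on version B (the rewrite author's own statement) =====
-- stated objective: alternative
-- what changed: Interchanged the loops (words outer, sentences inner): B lowers every sentence once up front and sweeps per-word hit/score/matched parallel arrays with zip-comprehensions, emitting the index->score dict in one final pass, instead of A's per-sentence dict building that re-lowers the sentence for every word.
import Mathlib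
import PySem

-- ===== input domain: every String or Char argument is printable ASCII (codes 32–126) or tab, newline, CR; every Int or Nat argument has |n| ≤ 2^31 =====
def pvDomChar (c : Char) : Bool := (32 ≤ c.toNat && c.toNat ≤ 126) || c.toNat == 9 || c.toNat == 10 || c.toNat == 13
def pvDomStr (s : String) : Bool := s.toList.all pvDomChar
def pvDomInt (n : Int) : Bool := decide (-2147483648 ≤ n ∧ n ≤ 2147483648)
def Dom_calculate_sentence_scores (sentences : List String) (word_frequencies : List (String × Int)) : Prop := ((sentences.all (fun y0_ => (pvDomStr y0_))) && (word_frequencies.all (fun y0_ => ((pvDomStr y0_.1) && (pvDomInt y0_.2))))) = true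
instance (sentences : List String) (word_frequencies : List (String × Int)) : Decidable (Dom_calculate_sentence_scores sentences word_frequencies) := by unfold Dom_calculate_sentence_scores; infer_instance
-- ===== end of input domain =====

-- B interchanges the loops (words outer, sentences inner) over lowered-once sentences with
-- zip-comprehension score/matched arrays, instead of A's per-sentence dict accumulation; same results.


-- ===== PORT A =====
def calculate_sentence_scores (sentences : List String) (word_frequencies : List (String × Int)) : List (Int × Int) :=
  ((PySem.List.enumerate sentences).foldl
    (fun d (p : Int × String) =>
      word_frequencies.foldl
        (fun (d : PySem.Dict Int Int) (q : String × Int) =>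
          if PySem.Str.isIn q.1 (PySem.Str.lower p.2) then
            if d.contains p.1 = false then d.insert p.1 q.2
            else d.modify p.1 0 (· + q.2)
          else d)
        d)
    PySem.Dict.empty).items

-- ===== PORT B =====
def calculate_sentence_scores_alt (sentences : List String) (word_frequencies : List (String × Int)) : List (Int × Int) :=
  let lowered := sentences.map PySem.Str.lower
  let sm := word_frequencies.foldl
    (fun (sm : List Int × List Bool) (q : String × Int) =>
      let hits := lowered.map (fun s => PySem.Str.isIn q.1 s)
      ((sm.1.zip hits).map (fun p => if p.2 then p.1 + q.2 else p.1),
       (sm.2.zip hits).map (fun p => p.1 || p.2)))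
    (List.replicate lowered.length (0 : Int), List.replicate lowered.length false)
  (PySem.List.enumerate (sm.1.zip sm.2)).filterMap
    (fun p => if p.2.2 then some (p.1, p.2.1) else none)

-- ===== PRECONDITION & SPEC =====
def Spec_calculate_sentence_scores (sentences : List String) (word_frequencies : List (String × Int)) (out : List (Int × Int)) : Prop := out = calculate_sentence_scores_alt sentences word_frequencies
instance (sentences : List String) (word_frequencies : List (String × Int)) (out : List (Int × Int)) : Decidable (Spec_calculate_sentence_scores sentences word_frequencies out) := by unfold Spec_calculate_sentence_scores; infer_instance

-- ===== CLAIM (what is proved, stated in full; the proofs are below) =====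
def Claim_equal_calculate_sentence_scores : Prop := ∀ (sentences : List String) (word_frequencies : List (String × Int)), Dom_calculate_sentence_scores sentences word_frequencies → Spec_calculate_sentence_scores sentences word_frequencies (calculate_sentence_scores sentences word_frequencies)

-- ===== LEMMAS AND PROOFS =====

/-- Sum of the frequencies of the words contained in (already-lowered) `t`. -/
def pvScore (wf : List (String × Int)) (t : String) : Int :=
  ((wf.filter (fun q => PySem.Str.isIn q.1 t)).map (·.2)).sum
def pvHit (wf : List (String × Int)) (t : String) : Bool :=
  wf.any (fun q => PySem.Str.isIn q.1 t)

lemma pv_foldB (wf : List (String × Int)) (lowered : List String)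
    (f : String → Int) (b : String → Bool) :
    wf.foldl
      (fun (sm : List Int × List Bool) (q : String × Int) =>
        let hits := lowered.map (fun s => PySem.Str.isIn q.1 s)
        ((sm.1.zip hits).map (fun p => if p.2 then p.1 + q.2 else p.1),
         (sm.2.zip hits).map (fun p => p.1 || p.2)))
      (lowered.map f, lowered.map b)
    = (lowered.map (fun t => f t + pvScore wf t), lowered.map (fun t => b t || pvHit wf t)) := by
  induction wf generalizing f b with
  | nil => simp [pvScore, pvHit]
  | cons q wf ih =>
    simp only [List.foldl_cons, List.zip_map', List.map_map]
    rw [ih]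
    congr 1 <;> · apply List.map_congr_left; intro t _
                  by_cases h : PySem.Str.isIn q.1 t = true <;>
                    simp only [Function.comp_apply, pvScore, pvHit, List.filter_cons, List.any_cons,
                      h, if_true, Bool.true_or, Bool.or_true, Bool.false_or,
                      List.map_cons, List.sum_cons, add_assoc, Bool.or_false] <;> simp

lemma pv_getD_last (l : List (Int × Int)) (i : Int) (v : Int)
    (hne : ∀ p ∈ l, p.1 ≠ i) :
    (PySem.Dict.mk (l ++ [(i, v)])).getD i 0 = v := by
  induction l with
  | nil =>
    rw [List.nil_append, PySem.Dict.getD_eq_get?_getD, PySem.Dict.get?_mk_cons]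
    simp
  | cons p l ihl =>
    rw [List.cons_append, PySem.Dict.getD_eq_get?_getD, PySem.Dict.get?_mk_cons]
    have hpi : (p.1 == i) = false := by simpa using hne p (by simp)
    rw [hpi]
    simp only [Bool.false_eq_true, if_false]
    rw [← PySem.Dict.getD_eq_get?_getD]
    exact ihl (fun r hr => hne r (by simp [hr]))

lemma pv_innerA2 (wf : List (String × Int)) (t : String) (l : List (Int × Int)) (i : Int) (v : Int)
    (hne : ∀ p ∈ l, p.1 ≠ i) :
    wf.foldl
      (fun (d : PySem.Dict Int Int) (q : String × Int) =>
        if PySem.Str.isIn q.1 t then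
          if d.contains i = false then d.insert i q.2
          else d.modify i 0 (· + q.2)
        else d)
      (PySem.Dict.mk (l ++ [(i, v)]))
    = PySem.Dict.mk (l ++ [(i, v + pvScore wf t)]) := by
  induction wf generalizing v with
  | nil => simp [pvScore]
  | cons q wf ih =>
    rw [List.foldl_cons]
    by_cases h : PySem.Str.isIn q.1 t = true
    · have hc : (PySem.Dict.mk (l ++ [(i, v)])).contains i = true := by
        rw [PySem.Dict.contains_eq_decide_mem_keys]
        simp [PySem.Dict.keys]
      have hmod : (PySem.Dict.mk (l ++ [(i, v)])).modify i 0 (· + q.2)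
          = PySem.Dict.mk (l ++ [(i, v + q.2)]) := by
        show (PySem.Dict.mk (l ++ [(i, v)])).insert i (((PySem.Dict.mk (l ++ [(i, v)])).getD i 0) + q.2) = _
        rw [pv_getD_last l i v hne]
        apply PySem.Dict.ext
        rw [PySem.Dict.items_insert_of_contains _ _ hc]
        show (l ++ [(i, v)]).map _ = l ++ [(i, v + q.2)]
        rw [List.map_append]
        congr 1
        · conv_rhs => rw [← List.map_id l]
          apply List.map_congr_left
          intro p hp
          have hpi : (p.1 == i) = false := by simpa using hne p hp
          simp [hpi]
        · simp
      rw [if_pos h, hc]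
      simp only [Bool.true_eq_false, if_false]
      rw [hmod, ih (v + q.2)]
      have : pvScore (q :: wf) t = q.2 + pvScore wf t := by
        simp only [pvScore, List.filter_cons, h, if_true, List.map_cons, List.sum_cons]
      rw [this, add_assoc]
    · rw [if_neg h]
      rw [ih v]
      have : pvScore (q :: wf) t = pvScore wf t := by
        simp only [pvScore, List.filter_cons, h, if_false, Bool.false_eq_true]
      rw [this]

lemma pv_innerA1 (wf : List (String × Int)) (t : String) (d : PySem.Dict Int Int) (i : Int)
    (hc : d.contains i = false) :
    wf.foldl
      (fun (d : PySem.Dict Int Int) (q : String × Int) =>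
        if PySem.Str.isIn q.1 t then
          if d.contains i = false then d.insert i q.2
          else d.modify i 0 (· + q.2)
        else d)
      d
    = if pvHit wf t then PySem.Dict.mk (d.items ++ [(i, pvScore wf t)]) else d := by
  induction wf with
  | nil => simp [pvHit]
  | cons q wf ih =>
    rw [List.foldl_cons]
    by_cases h : PySem.Str.isIn q.1 t = true
    · rw [if_pos h, hc]
      simp only [if_true]
      have hins : d.insert i q.2 = PySem.Dict.mk (d.items ++ [(i, q.2)]) := by
        apply PySem.Dict.ext
        rw [PySem.Dict.items_insert_of_not_contains _ _ hc]
      have hne : ∀ p ∈ d.items, p.1 ≠ i := by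
        intro p hp hpi
        have : d.contains i = true := by
          rw [PySem.Dict.contains_eq_decide_mem_keys]
          have : i ∈ d.keys := by
            show i ∈ d.items.map (·.1)
            exact List.mem_map.mpr ⟨p, hp, hpi⟩
          simp [this]
        rw [this] at hc; exact absurd hc (by simp)
      rw [hins, pv_innerA2 wf t d.items i q.2 hne]
      have hh : pvHit (q :: wf) t = true := by simp only [pvHit, List.any_cons, h, Bool.true_or]
      have hs : pvScore (q :: wf) t = q.2 + pvScore wf t := by
        simp only [pvScore, List.filter_cons, h, if_true, List.map_cons, List.sum_cons]
      rw [hh, if_pos rfl, hs]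
    · rw [if_neg h, ih]
      have hh : pvHit (q :: wf) t = pvHit wf t := by
        simp only [pvHit, List.any_cons, h, Bool.false_or]
      have hs : pvScore (q :: wf) t = pvScore wf t := by
        simp only [pvScore, List.filter_cons, h, if_false, Bool.false_eq_true]
      rw [hh, hs]

def pvSpecList (wf : List (String × Int)) (start : Int) (ss : List String) : List (Int × Int) :=
  (PySem.List.enumerate ss start).filterMap
    (fun p => if pvHit wf (PySem.Str.lower p.2) then some (p.1, pvScore wf (PySem.Str.lower p.2)) else none)

lemma pv_outerA (wf : List (String × Int)) (ss : List String) (start : Int) (d : PySem.Dict Int Int)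
    (hlt : ∀ k ∈ d.keys, k < start) :
    ((PySem.List.enumerate ss start).foldl
      (fun d (p : Int × String) =>
        wf.foldl
          (fun (d : PySem.Dict Int Int) (q : String × Int) =>
            if PySem.Str.isIn q.1 (PySem.Str.lower p.2) then
              if d.contains p.1 = false then d.insert p.1 q.2
              else d.modify p.1 0 (· + q.2)
            else d)
          d)
      d).items
    = d.items ++ pvSpecList wf start ss := by
  induction ss generalizing start d with
  | nil => simp [PySem.List.enumerate_nil, pvSpecList]
  | cons s ss ih =>
    rw [PySem.List.enumerate_cons, List.foldl_cons]
    have hc : d.contains start = false := by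
      rw [PySem.Dict.contains_eq_decide_mem_keys]
      have : start ∉ d.keys := fun hmem => absurd (hlt start hmem) (by omega)
      simp [this]
    rw [pv_innerA1 wf (PySem.Str.lower s) d start hc]
    by_cases hh : pvHit wf (PySem.Str.lower s) = true
    · rw [if_pos hh]
      rw [ih (start + 1) _ (by
        intro k hk
        have : k ∈ d.keys ++ [start] := by
          simpa [PySem.Dict.keys] using hk
        rcases List.mem_append.mp this with h1 | h1
        · have := hlt k h1; omega
        · simp at h1; omega)]
      show (d.items ++ [(start, pvScore wf (PySem.Str.lower s))]) ++ _ = _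
      rw [List.append_assoc]
      congr 1
      simp [pvSpecList, PySem.List.enumerate_cons, hh]
    · rw [if_neg hh, ih (start + 1) d (fun k hk => by have := hlt k hk; omega)]
      congr 1
      simp only [pvSpecList, PySem.List.enumerate_cons, List.filterMap_cons]
      rw [if_neg hh]

lemma pv_enumerate_map {α β : Type} (ss : List α) (f : α → β) (s : Int) :
    PySem.List.enumerate (ss.map f) s = (PySem.List.enumerate ss s).map (fun p => (p.1, f p.2)) := by
  induction ss generalizing s with
  | nil => simp [PySem.List.enumerate_nil]
  | cons x xs ih => simp [PySem.List.enumerate_cons, ih]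

lemma pv_A_eq (sentences : List String) (wf : List (String × Int)) :
    calculate_sentence_scores sentences wf = pvSpecList wf 0 sentences := by
  unfold calculate_sentence_scores
  rw [pv_outerA wf sentences 0 PySem.Dict.empty (by simp [PySem.Dict.keys_empty])]
  rfl

lemma pv_B_eq (sentences : List String) (wf : List (String × Int)) :
    calculate_sentence_scores_alt sentences wf = pvSpecList wf 0 sentences := by
  unfold calculate_sentence_scores_alt
  simp only []
  rw [show (List.replicate (sentences.map PySem.Str.lower).length (0 : Int), List.replicate (sentences.map PySem.Str.lower).length false)
        = ((sentences.map PySem.Str.lower).map (fun _ => (0 : Int)), (sentences.map PySem.Str.lower).map (fun _ => false)) by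
      simp [Function.comp_def, List.map_const']]
  rw [pv_foldB wf (sentences.map PySem.Str.lower) (fun _ => 0) (fun _ => false)]
  rw [List.zip_map', pv_enumerate_map, pv_enumerate_map, List.filterMap_map, List.filterMap_map]
  simp only [pvSpecList]
  congr 1
  funext p
  simp

-- ===== VERDICT (by name: the statement is the Claim_ definition above) =====
theorem calculate_sentence_scores_spec : Claim_equal_calculate_sentence_scores := by
  intro sentences wf _
  unfold Spec_calculate_sentence_scores
  rw [pv_A_eq, pv_B_eq]
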